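-- pv_equiv track=rewrite | github.com/ChaissonLab/extend_ctyper_database | scripts/getblocks_frombed.py | clip_abs_to_rel
-- ===== SOURCE A (Python) =====
-- def merge_intervals(intervals):
--     if not intervals: return []
--     intervals.sort()
--     merged = [list(intervals[0])]
--     for s, e in intervals[1:]:
--         last = merged[-1]
--         if s <= last[1]:
--             if e > last[1]:
--                 last[1] = e
--         else:
--             merged.append([s, e])
--     return [(s, e) for s, e in merged]
--
-- def clip_abs_to_rel(abs_targets, start0, end0):
--     """Convert absolute targets to relative [0, L) and clip; merge overlaps."""
--     L = end0 - start0
--     rel = []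
--     for a, b in abs_targets:
--         rs, re = a - start0, b - start0
--         if re <= 0 or rs >= L:
--             continue
--         if rs < 0: rs = 0
--         if re > L: re = L
--         if rs < re:
--             rel.append((rs, re))
--     return merge_intervals(rel)
-- ===== SOURCE B (Python) =====
-- def clip_abs_to_rel(abs_targets, start0, end0):
--     """Convert absolute targets to relative [0, L) and clip; merge overlaps."""
--     L = end0 - start0
--     events = []
--     for a, b in abs_targets:
--         rs = max(a - start0, 0)
--         re = min(b - start0, L)
--         if rs < re:
--             events.append((rs, 0))
--             events.append((re, 1))
--     events.sort()
--     out = []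
--     depth = 0
--     block_start = 0
--     for p, t in events:
--         if t == 0:
--             if depth == 0:
--                 block_start = p
--             depth += 1
--         else:
--             depth -= 1
--             if depth == 0:
--                 out.append((block_start, p))
--     return out
-- ===== Notes on version B (the rewrite author's own statement) =====
-- stated objective: alternative
-- what changed: Replaces sort-the-clipped-intervals-then-linear-merge with an event sweep: each kept clipped interval emits a (start,0) and an (end,1) event, the events are sorted (starts before ends at equal coordinates, giving the same touching-merge), and one pass with a depth counter emits a merged block each time the depth returns to zero.
import Mathlib
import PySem

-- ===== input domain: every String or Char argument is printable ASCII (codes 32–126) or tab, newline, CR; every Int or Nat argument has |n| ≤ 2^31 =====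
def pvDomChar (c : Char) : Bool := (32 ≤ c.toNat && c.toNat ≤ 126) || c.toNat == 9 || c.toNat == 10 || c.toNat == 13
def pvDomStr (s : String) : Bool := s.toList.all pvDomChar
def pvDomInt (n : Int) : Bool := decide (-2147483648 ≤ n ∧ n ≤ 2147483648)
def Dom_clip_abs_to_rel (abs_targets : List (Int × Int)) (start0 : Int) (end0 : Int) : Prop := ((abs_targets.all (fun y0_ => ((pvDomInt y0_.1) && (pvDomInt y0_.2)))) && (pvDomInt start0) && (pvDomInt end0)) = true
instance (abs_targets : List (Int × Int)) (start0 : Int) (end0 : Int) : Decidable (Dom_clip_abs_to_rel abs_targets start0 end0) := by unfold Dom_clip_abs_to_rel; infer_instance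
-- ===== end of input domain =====

-- B replaces A's sort-intervals-then-linear-merge with a sorted start/end event sweep
-- using a depth counter (alternative algorithm, same O(n log n) cost; return values equal).

-- ===== PORT A =====
-- loop body of A's `for s, e in intervals[1:]` (state: finished blocks, current last block)
def pvMergeStep (st : List (Int × Int) × (Int × Int)) (se : Int × Int) : List (Int × Int) × (Int × Int) :=
  if se.1 ≤ st.2.2 then (st.1, (st.2.1, if se.2 > st.2.2 then se.2 else st.2.2))
  else (st.1 ++ [st.2], se)

def merge_intervals (intervals : List (Int × Int)) : List (Int × Int) :=
  if intervals = [] then []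
  else
    match PySem.List.sorted2 intervals Prod.fst Prod.snd with
    | [] => []
    | first :: rest =>
      let st := rest.foldl pvMergeStep ([], first)
      st.1 ++ [st.2]

-- loop body of A's clipping `for a, b in abs_targets`
def pvClipStepA (start0 L : Int) (rel : List (Int × Int)) (ab : Int × Int) : List (Int × Int) :=
  let rs := ab.1 - start0
  let re := ab.2 - start0
  if re ≤ 0 ∨ rs ≥ L then rel
  else
    let rs := if rs < 0 then 0 else rs
    let re := if re > L then L else re
    if rs < re then rel ++ [(rs, re)] else rel

def clip_abs_to_rel (abs_targets : List (Int × Int)) (start0 : Int) (end0 : Int) : List (Int × Int) :=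
  let L := end0 - start0
  let rel := abs_targets.foldl (pvClipStepA start0 L) []
  merge_intervals rel

-- ===== PORT B =====
-- loop body of B's clipping pass: appends the two events of a kept interval
def pvClipStepB (start0 L : Int) (ev : List (Int × Int)) (ab : Int × Int) : List (Int × Int) :=
  let rs := max (ab.1 - start0) 0
  let re := min (ab.2 - start0) L
  if rs < re then ev ++ [(rs, 0), (re, 1)] else ev

-- loop body of B's sweep: state = (depth, block_start, out)
def pvSweepStep (st : Int × Int × List (Int × Int)) (pt : Int × Int) : Int × Int × List (Int × Int) :=
  if pt.2 = 0 then (st.1 + 1, if st.1 = 0 then pt.1 else st.2.1, st.2.2)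
  else (st.1 - 1, st.2.1, if st.1 - 1 = 0 then st.2.2 ++ [(st.2.1, pt.1)] else st.2.2)

def clip_abs_to_rel_alt (abs_targets : List (Int × Int)) (start0 : Int) (end0 : Int) : List (Int × Int) :=
  let L := end0 - start0
  let events := abs_targets.foldl (pvClipStepB start0 L) []
  let sortedEv := PySem.List.sorted2 events Prod.fst Prod.snd
  (sortedEv.foldl pvSweepStep (0, 0, [])).2.2

-- ===== PRECONDITION & SPEC =====
def Spec_clip_abs_to_rel (abs_targets : List (Int × Int)) (start0 : Int) (end0 : Int) (out : List (Int × Int)) : Prop := out = clip_abs_to_rel_alt abs_targets start0 end0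
instance (abs_targets : List (Int × Int)) (start0 : Int) (end0 : Int) (out : List (Int × Int)) : Decidable (Spec_clip_abs_to_rel abs_targets start0 end0 out) := by unfold Spec_clip_abs_to_rel; infer_instance

-- ===== CLAIM (what is proved, stated in full; the proofs are below) =====
def Claim_equal_clip_abs_to_rel : Prop := ∀ (abs_targets : List (Int × Int)) (start0 : Int) (end0 : Int), Dom_clip_abs_to_rel abs_targets start0 end0 → Spec_clip_abs_to_rel abs_targets start0 end0 (clip_abs_to_rel abs_targets start0 end0)

-- ===== LEMMAS AND PROOFS =====

-- Python's lexicographic `≤` on int pairs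
def pvLeE (a b : Int × Int) : Prop := a.1 < b.1 ∨ (a.1 = b.1 ∧ a.2 ≤ b.2)

lemma pvLeE_trans {a b c : Int × Int} (h1 : pvLeE a b) (h2 : pvLeE b c) : pvLeE a c := by
  unfold pvLeE at *; omega

lemma pvLeE_antisymm {a b : Int × Int} (h1 : pvLeE a b) (h2 : pvLeE b a) : a = b := by
  unfold pvLeE at *
  obtain ⟨x, y⟩ := a; obtain ⟨u, v⟩ := b
  simp_all; omega

-- the `before` test that PySem.List.sorted2 Prod.fst Prod.snd uses
def pvBe (a b : Int × Int) : Bool :=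
  decide (a.1 < b.1) || (!decide (b.1 < a.1) && decide (a.2 < b.2))

lemma pvBe_false_iff (a b : Int × Int) : pvBe a b = false ↔ pvLeE b a := by
  unfold pvBe pvLeE; simp; omega

lemma sorted2_eq_foldl (xs : List (Int × Int)) :
    PySem.List.sorted2 xs Prod.fst Prod.snd false
      = xs.foldl (fun acc x => PySem.List.insertBy pvBe x acc) [] := rfl

lemma pvBe_true (a b : Int × Int) : pvBe a b = true → pvLeE a b := by
  unfold pvBe pvLeE; simp; omega

lemma insertBy_pairwise (x : Int × Int) (ys : List (Int × Int))
    (h : ys.Pairwise pvLeE) : (PySem.List.insertBy pvBe x ys).Pairwise pvLeE := by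
  induction ys with
  | nil => simp [PySem.List.insertBy]
  | cons y ys ih =>
    rw [List.pairwise_cons] at h
    simp only [PySem.List.insertBy]
    by_cases hbe : pvBe x y = true
    · simp only [hbe, if_pos]
      refine List.Pairwise.cons ?_ (List.Pairwise.cons h.1 h.2)
      intro z hz
      rcases List.mem_cons.1 hz with hz | hz
      · exact hz ▸ pvBe_true x y hbe
      · exact pvLeE_trans (pvBe_true x y hbe) (h.1 z hz)
    · rw [Bool.not_eq_true] at hbe
      simp only [hbe, Bool.false_eq_true, if_false]
      refine List.Pairwise.cons ?_ (ih h.2)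
      intro z hz
      rcases (PySem.List.mem_insertBy pvBe x z ys).1 hz with hz | hz
      · exact hz ▸ (pvBe_false_iff x y).1 hbe
      · exact h.1 z hz

lemma sorted2_pairwise' (xs : List (Int × Int)) :
    (PySem.List.sorted2 xs Prod.fst Prod.snd false).Pairwise pvLeE := by
  rw [sorted2_eq_foldl]
  suffices h : ∀ (l acc : List (Int × Int)), acc.Pairwise pvLeE →
      (l.foldl (fun acc x => PySem.List.insertBy pvBe x acc) acc).Pairwise pvLeE from
    h xs [] (by simp)
  intro l
  induction l with
  | nil => intro acc h; simpa using h
  | cons x l ih => intro acc h; exact ih _ (insertBy_pairwise x acc h)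

/-- uniqueness of the sorted arrangement: any `pvLeE`-pairwise permutation IS sorted2 -/
lemma sorted2_eqU (xs ys : List (Int × Int)) (hp : ys.Perm xs) (hs : ys.Pairwise pvLeE) :
    PySem.List.sorted2 xs Prod.fst Prod.snd false = ys := by
  exact List.Perm.eq_of_pairwise (fun a b _ _ h1 h2 => pvLeE_antisymm h1 h2)
    (sorted2_pairwise' xs) hs
    ((PySem.List.sorted2_perm xs Prod.fst Prod.snd false).trans hp.symm)

lemma sorted2_perm_inv (xs xs' : List (Int × Int)) (h : xs.Perm xs') :
    PySem.List.sorted2 xs Prod.fst Prod.snd false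
      = PySem.List.sorted2 xs' Prod.fst Prod.snd false :=
  sorted2_eqU xs _ ((PySem.List.sorted2_perm xs' Prod.fst Prod.snd false).trans h.symm)
    (sorted2_pairwise' xs')

lemma sorted2_split (xs ys : List (Int × Int)) (x : Int × Int)
    (h1 : ∀ u ∈ xs, pvLeE u x) (h2 : ∀ v ∈ ys, pvLeE x v) :
    PySem.List.sorted2 (xs ++ x :: ys) Prod.fst Prod.snd false
      = PySem.List.sorted2 xs Prod.fst Prod.snd false
        ++ x :: PySem.List.sorted2 ys Prod.fst Prod.snd false := by
  refine sorted2_eqU _ _ ?_ ?_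
  · exact ((PySem.List.sorted2_perm xs Prod.fst Prod.snd false).append
      ((PySem.List.sorted2_perm ys Prod.fst Prod.snd false).cons x))
  · rw [List.pairwise_append]
    refine ⟨sorted2_pairwise' xs, ?_, ?_⟩
    · refine List.Pairwise.cons ?_ (sorted2_pairwise' ys)
      intro v hv
      exact h2 v ((PySem.List.sorted2_perm ys Prod.fst Prod.snd false).mem_iff.1 hv)
    · intro u hu v hv
      have hux := h1 u ((PySem.List.sorted2_perm xs Prod.fst Prod.snd false).mem_iff.1 hu)
      rcases List.mem_cons.1 hv with hv | hv
      · exact hv ▸ hux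
      · exact pvLeE_trans hux
          (h2 v ((PySem.List.sorted2_perm ys Prod.fst Prod.snd false).mem_iff.1 hv))

-- sorting end-only events is sorting the coordinates
lemma sorted2_map_end (ends : List Int) :
    PySem.List.sorted2 (ends.map (fun e => (e, (1 : Int)))) Prod.fst Prod.snd false
      = (PySem.List.sorted ends (fun x => x) false).map (fun e => (e, (1 : Int))) := by
  refine sorted2_eqU _ _ ?_ ?_
  · exact (PySem.List.sorted_perm ends (fun x => x) false).map _
  · refine List.Pairwise.map _ ?_ (PySem.List.sorted_pairwise ends (fun x => x))
    intro a b hab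
    unfold pvLeE
    rcases lt_or_eq_of_le hab with h | h
    · exact Or.inl h
    · exact Or.inr ⟨h, le_refl _⟩

-- max of a nonempty list (0 on [])
def pvMaxL : List Int → Int
  | [] => 0
  | x :: xs => xs.foldl max x

lemma pvMaxL_mem (l : List Int) (h : l ≠ []) : pvMaxL l ∈ l := by
  cases l with
  | nil => exact absurd rfl h
  | cons x xs =>
    rcases PySem.List.foldl_max_mem xs x with h' | h'
    · simp [pvMaxL, h']
    · simp [pvMaxL]; right; exact h' 

lemma pvMaxL_ge (l : List Int) : ∀ x ∈ l, x ≤ pvMaxL l := by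
  cases l with
  | nil => simp
  | cons x xs =>
    intro y hy
    rcases List.mem_cons.1 hy with hy | hy
    · exact hy ▸ (PySem.List.le_foldl_max xs x).1
    · exact (PySem.List.le_foldl_max xs x).2 y hy

lemma foldl_max_max (l : List Int) : ∀ a b, l.foldl max (max a b) = max (l.foldl max a) b := by
  induction l with
  | nil => intro a b; rfl
  | cons x l ih =>
    intro a b
    simp only [List.foldl_cons]
    rw [max_right_comm a b x, ih]

lemma pvMaxL_cons (e : Int) (l : List Int) (h : l ≠ []) :
    pvMaxL (e :: l) = max (pvMaxL l) e := by
  cases l with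
  | nil => exact absurd rfl h
  | cons y t =>
    show (y :: t).foldl max e = max (t.foldl max y) e
    simp only [List.foldl_cons]
    rw [max_comm e y, foldl_max_max]

-- the event list of a list of intervals
def pvEv (l : List (Int × Int)) : List (Int × Int) :=
  l.flatMap (fun p => [(p.1, 0), (p.2, 1)])

lemma pvEv_snd (l : List (Int × Int)) : ∀ q ∈ pvEv l, q.2 = 0 ∨ q.2 = 1 := by
  intro q hq
  rcases List.mem_flatMap.1 hq with ⟨p, _, hq⟩
  rcases List.mem_cons.1 hq with h | h
  · left; rw [h]
  · simp at h; rw [h]; right; rfl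

lemma pvEv_coord (l : List (Int × Int)) (hpos : ∀ p ∈ l, p.1 < p.2) (s : Int)
    (hlb : ∀ p ∈ l, s ≤ p.1) : ∀ q ∈ pvEv l, s ≤ q.1 := by
  intro q hq
  rcases List.mem_flatMap.1 hq with ⟨p, hp, hq⟩
  rcases List.mem_cons.1 hq with h | h
  · rw [h]; exact hlb p hp
  · simp at h; rw [h]
    have := hpos p hp
    have := hlb p hp
    omega

-- recursive reference form of A's merge loop
def chase : (Int × Int) → List (Int × Int) → (Int × Int) × List (Int × Int)
  | cur, [] => (cur, [])
  | cur, se :: r => if se.1 ≤ cur.2 then chase (cur.1, max cur.2 se.2) r else (cur, se :: r)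

lemma chase_rest_length : ∀ (cur : Int × Int) (l : List (Int × Int)),
    (chase cur l).2.length ≤ l.length := by
  intro cur l
  induction l generalizing cur with
  | nil => simp [chase]
  | cons x r ih =>
    simp only [chase]
    split
    · exact le_trans (ih _) (by simp)
    · simp

def mergeRec : List (Int × Int) → List (Int × Int)
  | [] => []
  | x :: r => (chase x r).1 :: mergeRec (chase x r).2
  termination_by l => l.length
  decreasing_by
    have := chase_rest_length x r
    simp only [List.length_cons]; omega

-- A's fold equals the recursive form
lemma foldA_eq_mergeRec : ∀ (l : List (Int × Int)) (done : List (Int × Int)) (cur : Int × Int),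
    (l.foldl pvMergeStep (done, cur)).1 ++ [(l.foldl pvMergeStep (done, cur)).2]
      = done ++ (chase cur l).1 :: mergeRec (chase cur l).2 := by
  intro l
  induction l with
  | nil => intro done cur; simp [chase, mergeRec]
  | cons se r ih =>
    intro done cur
    simp only [List.foldl_cons, pvMergeStep]
    by_cases hc : se.1 ≤ cur.2
    · rw [if_pos hc]
      have hmax : (if se.2 > cur.2 then se.2 else cur.2) = max cur.2 se.2 := by
        split <;> omega
      rw [hmax, ih]
      have hch : chase cur (se :: r) = chase (cur.1, max cur.2 se.2) r := by
        rw [chase, if_pos hc]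
      rw [hch]
    · rw [if_neg hc, ih]
      have hch : chase cur (se :: r) = (cur, se :: r) := by
        rw [chase, if_neg hc]
      rw [hch]
      show (done ++ [cur]) ++ _ = _
      rw [List.append_assoc]
      congr 1
      show _ = cur :: mergeRec (se :: r)
      rw [mergeRec]
      simp

lemma sweep_step_end (d bs : Int) (out : List (Int × Int)) (e : Int) :
    pvSweepStep (d, bs, out) (e, 1) = (d - 1, bs, if d - 1 = 0 then out ++ [(bs, e)] else out) := by
  simp [pvSweepStep]

lemma sweep_step_start (d bs : Int) (out : List (Int × Int)) (p : Int) :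
    pvSweepStep (d, bs, out) (p, 0) = (d + 1, if d = 0 then p else bs, out) := by
  simp [pvSweepStep]

-- S1: sweeping end events with depth still above their count: pure decrement, no output
lemma sweep_dec : ∀ (es : List Int) (d bs : Int) (out : List (Int × Int)),
    (es.length : Int) < d →
    List.foldl pvSweepStep (d, bs, out) (es.map (fun e => (e, (1 : Int))))
      = (d - es.length, bs, out) := by
  intro es
  induction es with
  | nil => intro d bs out _; simp
  | cons e es ih =>
    intro d bs out hd
    simp only [List.length_cons, Nat.cast_add, Nat.cast_one] at hd
    simp only [List.map_cons, List.foldl_cons, sweep_step_end]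
    rw [if_neg (by omega), ih (d - 1) bs out (by omega)]
    simp only [List.length_cons]
    congr 1
    push_cast
    omega

-- S2: sweeping exactly the pending end events: depth reaches 0 at the last one, one block out
lemma sweep_fin : ∀ (es : List Int) (h : es ≠ []) (bs : Int) (out : List (Int × Int)),
    List.foldl pvSweepStep ((es.length : Int), bs, out) (es.map (fun e => (e, (1 : Int))))
      = (0, bs, out ++ [(bs, es.getLast h)]) := by
  intro es
  induction es with
  | nil => intro h; exact absurd rfl h
  | cons e es ih =>
    intro _ bs out
    cases es with
    | nil =>
      simp [sweep_step_end, List.getLast]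
    | cons y t =>
      rw [List.map_cons, List.foldl_cons, sweep_step_end]
      rw [show ((e :: y :: t).length : Int) = ((y :: t).length : Int) + 1 by
        simp [List.length_cons]]
      have hpos : (0 : Int) < ((y :: t).length : Int) := by
        exact_mod_cast List.length_pos_of_ne_nil (l := y :: t) (by simp)
      rw [if_neg (by omega), show ((y :: t).length : Int) + 1 - 1 = ((y :: t).length : Int) by omega]
      rw [List.getLast_cons (l := y :: t) (a := e) (by simp), ih (by simp) bs out]

lemma sorted_getLast_max (es : List Int) (h : es ≠ []) (hs : es.Pairwise (· ≤ ·)) :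
    ∀ x ∈ es, x ≤ es.getLast h := by
  induction es with
  | nil => exact absurd rfl h
  | cons e t ih =>
    intro x hx
    cases t with
    | nil => simp at hx; simp [hx, List.getLast]
    | cons y t' =>
      rw [List.pairwise_cons] at hs
      rw [List.getLast_cons (by simp)]
      rcases List.mem_cons.1 hx with hx | hx
      · exact hx ▸ le_trans (hs.1 _ (List.getLast_mem (by simp))) (le_refl _)
      · exact ih (by simp) hs.2 x hx

lemma pvEv_cons (p : Int × Int) (l : List (Int × Int)) :
    pvEv (p :: l) = (p.1, 0) :: (p.2, 1) :: pvEv l := by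
  simp [pvEv]

-- sweeping exactly the sorted pending end events closes the block at their max
lemma sweep_ends (ends : List Int) (hne : ends ≠ []) (a : Int) (out : List (Int × Int)) :
    List.foldl pvSweepStep ((ends.length : Int), a, out)
        (PySem.List.sorted2 (ends.map (fun e => (e, (1 : Int)))) Prod.fst Prod.snd false)
      = (0, a, out ++ [(a, pvMaxL ends)]) := by
  rw [sorted2_map_end]
  have hesne : PySem.List.sorted ends (fun x => x) false ≠ [] := by
    rw [Ne, PySem.List.sorted_eq_nil_iff]; exact hne
  have hlen : (PySem.List.sorted ends (fun x => x) false).length = ends.length :=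
    PySem.List.length_sorted ends (fun x => x) false
  have hperm := PySem.List.sorted_perm ends (fun x => x) false
  have hpw : (PySem.List.sorted ends (fun x => x) false).Pairwise (· ≤ ·) :=
    PySem.List.sorted_pairwise ends (fun x => x)
  have hlast : (PySem.List.sorted ends (fun x => x) false).getLast hesne = pvMaxL ends := by
    apply le_antisymm
    · exact pvMaxL_ge ends _ (hperm.subset (List.getLast_mem hesne))
    · exact sorted_getLast_max _ hesne hpw _ (hperm.mem_iff.2 (pvMaxL_mem ends hne))
  rw [← hlen, sweep_fin _ hesne a out, hlast]

-- G: the sweep invariant, by structural induction on the (sorted) remaining intervals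
lemma sweepG : ∀ (S : List (Int × Int)), S.Pairwise pvLeE → (∀ p ∈ S, p.1 < p.2) →
    ∀ (ends : List Int), ends ≠ [] → ∀ (a : Int) (out : List (Int × Int)),
    ∃ b, List.foldl pvSweepStep ((ends.length : Int), a, out)
        (PySem.List.sorted2 (ends.map (fun e => (e, (1 : Int))) ++ pvEv S) Prod.fst Prod.snd false)
      = (0, b, out ++ (chase (a, pvMaxL ends) S).1 :: mergeRec (chase (a, pvMaxL ends) S).2) := by
  intro S
  induction S with
  | nil =>
    intro _ _ ends hne a out
    refine ⟨a, ?_⟩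
    rw [show pvEv [] = ([] : List (Int × Int)) from rfl, List.append_nil,
      sweep_ends ends hne a out]
    simp [chase, mergeRec]
  | cons x S' ih =>
    obtain ⟨s, e⟩ := x
    intro hs hpos ends hne a out
    have hse : s < e := hpos (s, e) (by simp)
    have hS'lb : ∀ p ∈ S', s ≤ p.1 := by
      intro p hp
      have := (List.pairwise_cons.1 hs).1 p hp
      unfold pvLeE at this
      dsimp only at this
      omega
    have hS'pos : ∀ p ∈ S', p.1 < p.2 := fun p hp => hpos p (List.mem_cons_of_mem _ hp)
    have hS'pw := (List.pairwise_cons.1 hs).2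
    have hevlb : ∀ q ∈ pvEv S', s ≤ q.1 := pvEv_coord S' hS'pos s hS'lb
    have hevsnd := pvEv_snd S'
    have hx_le : ∀ v ∈ (e, (1 : Int)) :: pvEv S', pvLeE (s, (0 : Int)) v := by
      intro v hv
      rcases List.mem_cons.1 hv with hv | hv
      · rw [hv]; unfold pvLeE; left; exact hse
      · have h1 := hevlb v hv
        have h2 := hevsnd v hv
        unfold pvLeE
        dsimp only
        omega
    by_cases hcase : s ≤ pvMaxL ends
    · -- current interval joins the open block
      set low := ends.filter (fun x => decide (x < s)) with hlowdef
      set high := ends.filter (fun x => !decide (x < s)) with hhighdef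
      have hperm : (low ++ high).Perm ends := List.filter_append_perm _ ends
      have hMends : pvMaxL ends ∈ ends := pvMaxL_mem ends hne
      have hMhigh : pvMaxL ends ∈ high := by
        rw [hhighdef, List.mem_filter]
        refine ⟨hMends, by simp; omega⟩
      have hhighne : high ≠ [] := fun h => by rw [h] at hMhigh; cases hMhigh
      have hMhighmax : pvMaxL high = pvMaxL ends := by
        apply le_antisymm
        · exact pvMaxL_ge ends _ (hperm.subset (List.mem_append_right low (pvMaxL_mem high hhighne)))
        · exact pvMaxL_ge high _ hMhigh
      have hlenlh : low.length + high.length = ends.length := by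
        have := hperm.length_eq
        simpa using this
      have hhighpos : 0 < high.length := List.length_pos_of_ne_nil hhighne
      -- rearrange the event multiset and split the sorted list at the start event
      have hpermev : (ends.map (fun e => (e, (1 : Int))) ++ pvEv ((s, e) :: S')).Perm
          (low.map (fun e => (e, (1 : Int))) ++ (s, (0 : Int)) ::
            (high.map (fun e => (e, (1 : Int))) ++ (e, (1 : Int)) :: pvEv S')) := by
        rw [pvEv_cons]
        dsimp only
        refine ((hperm.map (fun e => (e, (1 : Int)))).symm.append_right _).trans ?_
        rw [List.map_append, List.append_assoc]
        exact List.Perm.append_left _ List.perm_middle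
      have hsplit := sorted2_split (low.map (fun e => (e, (1 : Int))))
        (high.map (fun e => (e, (1 : Int))) ++ (e, (1 : Int)) :: pvEv S') (s, (0 : Int))
        (by
          intro u hu
          rcases List.mem_map.1 hu with ⟨x, hx, rfl⟩
          rw [hlowdef, List.mem_filter] at hx
          unfold pvLeE
          left
          dsimp only
          have := hx.2
          simp at this
          exact this)
        (by
          intro v hv
          rcases List.mem_append.1 hv with hv | hv
          · rcases List.mem_map.1 hv with ⟨x, hx, rfl⟩
            rw [hhighdef, List.mem_filter] at hx
            have hxs : ¬ x < s := by simpa using hx.2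
            unfold pvLeE
            dsimp only
            omega
          · exact hx_le v hv)
      rw [sorted2_perm_inv _ _ hpermev, hsplit, List.foldl_append, sorted2_map_end low]
      -- low end events: pure decrement
      rw [show (ends.length : Int) = (low.length : Int) + (high.length : Int) by
        push_cast [← hlenlh]; ring]
      rw [sweep_dec _ _ a out (by rw [PySem.List.length_sorted]; omega)]
      rw [PySem.List.length_sorted]
      -- the start event: depth is |high| ≥ 1, block stays open
      rw [List.foldl_cons, sweep_step_start, if_neg (by omega)]
      rw [show (low.length : Int) + (high.length : Int) - (low.length : Int) + 1
          = (((e :: high).length : Int)) by push_cast [List.length_cons]; ring]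
      -- remaining events: apply the induction hypothesis with pending ends e :: high
      have hpermrest : (high.map (fun e => (e, (1 : Int))) ++ (e, (1 : Int)) :: pvEv S').Perm
          ((e :: high).map (fun e => (e, (1 : Int))) ++ pvEv S') := by
        rw [List.map_cons]
        exact List.perm_middle.trans (by rfl)
      rw [sorted2_perm_inv _ _ hpermrest]
      obtain ⟨b, hb⟩ := ih hS'pw hS'pos (e :: high) (by simp) a out
      refine ⟨b, ?_⟩
      rw [hb]
      have hchase : chase (a, pvMaxL ends) ((s, e) :: S')
          = chase (a, max (pvMaxL ends) e) S' := by
        rw [chase, if_pos hcase]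
      rw [hchase, pvMaxL_cons e high hhighne, hMhighmax]
    · -- gap: the open block closes before this interval starts
      rw [pvEv_cons]
      dsimp only
      have hsplit := sorted2_split (ends.map (fun e => (e, (1 : Int))))
        ((e, (1 : Int)) :: pvEv S') (s, (0 : Int))
        (by
          intro u hu
          rcases List.mem_map.1 hu with ⟨x, hx, rfl⟩
          have := pvMaxL_ge ends x hx
          unfold pvLeE
          left
          dsimp only
          omega)
        hx_le
      rw [show ends.map (fun e => (e, (1 : Int))) ++ (s, (0 : Int)) :: (e, (1 : Int)) :: pvEv S'
          = ends.map (fun e => (e, (1 : Int))) ++ ((s, (0 : Int)) :: ((e, (1 : Int)) :: pvEv S')) from rfl,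
        hsplit, List.foldl_append, sweep_ends ends hne a out, List.foldl_cons, sweep_step_start,
        if_pos rfl]
      obtain ⟨b, hb⟩ := ih hS'pw hS'pos [e] (by simp) s (out ++ [(a, pvMaxL ends)])
      refine ⟨b, ?_⟩
      rw [show (0 : Int) + 1 = (([e].length : Int)) by simp]
      rw [show PySem.List.sorted2 ((e, (1 : Int)) :: pvEv S') Prod.fst Prod.snd false
          = PySem.List.sorted2 ([e].map (fun e => (e, (1 : Int))) ++ pvEv S') Prod.fst Prod.snd false
          from by rfl]
      rw [hb]
      have hchase : chase (a, pvMaxL ends) ((s, e) :: S') = ((a, pvMaxL ends), (s, e) :: S') := by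
        rw [chase, if_neg (by dsimp only; omega)]
      rw [hchase]
      have hmx : pvMaxL [e] = e := rfl
      rw [hmx]
      dsimp only
      rw [mergeRec, List.append_assoc]
      simp

-- MAIN: sweeping the sorted events of a sorted positive interval list is the merge
lemma sweep_main (S : List (Int × Int)) (hs : S.Pairwise pvLeE) (hpos : ∀ p ∈ S, p.1 < p.2) :
    (List.foldl pvSweepStep (0, 0, [])
        (PySem.List.sorted2 (pvEv S) Prod.fst Prod.snd false)).2.2 = mergeRec S := by
  cases S with
  | nil =>
    rw [show (PySem.List.sorted2 (pvEv []) Prod.fst Prod.snd false) = [] from rfl, mergeRec]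
    rfl
  | cons x S' =>
    obtain ⟨s, e⟩ := x
    have hse : s < e := hpos (s, e) (by simp)
    have hS'lb : ∀ p ∈ S', s ≤ p.1 := by
      intro p hp
      have := (List.pairwise_cons.1 hs).1 p hp
      unfold pvLeE at this
      dsimp only at this
      omega
    have hS'pos : ∀ p ∈ S', p.1 < p.2 := fun p hp => hpos p (List.mem_cons_of_mem _ hp)
    have hsplit := sorted2_split [] ((e, (1 : Int)) :: pvEv S') (s, (0 : Int))
      (by intro u hu; cases hu)
      (by
        intro v hv
        rcases List.mem_cons.1 hv with hv | hv
        · rw [hv]; unfold pvLeE; left; exact hse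
        · have h1 := pvEv_coord S' hS'pos s hS'lb v hv
          have h2 := pvEv_snd S' v hv
          unfold pvLeE
          dsimp only
          omega)
    rw [show pvEv ((s, e) :: S') = [] ++ (s, (0 : Int)) :: (e, (1 : Int)) :: pvEv S' from
      by rw [pvEv_cons]; rfl]
    rw [hsplit]
    rw [show PySem.List.sorted2 ([] : List (Int × Int)) Prod.fst Prod.snd false = [] from rfl]
    rw [List.nil_append, List.foldl_cons, sweep_step_start, if_pos rfl]
    obtain ⟨b, hb⟩ := sweepG S' (List.pairwise_cons.1 hs).2 hS'pos [e] (by simp) s []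
    rw [show (0 : Int) + 1 = (([e].length : Int)) by simp]
    rw [show PySem.List.sorted2 ((e, (1 : Int)) :: pvEv S') Prod.fst Prod.snd false
        = PySem.List.sorted2 ([e].map (fun e => (e, (1 : Int))) ++ pvEv S') Prod.fst Prod.snd false
        from by rfl]
    rw [hb]
    rw [show pvMaxL [e] = e from rfl, mergeRec]
    rfl

-- the two clipping passes: B's event list is the event list of A's rel list
lemma clipB_eq_ev : ∀ (ts : List (Int × Int)) (start0 L : Int)
    (relacc : List (Int × Int)),
    ts.foldl (pvClipStepB start0 L) (pvEv relacc) = pvEv (ts.foldl (pvClipStepA start0 L) relacc) := by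
  intro ts
  induction ts with
  | nil => intro start0 L relacc; rfl
  | cons ab ts ih =>
    intro start0 L relacc
    simp only [List.foldl_cons]
    rw [show pvClipStepB start0 L (pvEv relacc) ab = pvEv (pvClipStepA start0 L relacc ab) from ?_,
      ih]
    unfold pvClipStepA pvClipStepB
    by_cases hk : max (ab.1 - start0) 0 < min (ab.2 - start0) L
    · rw [if_pos hk, if_neg (by omega)]
      rw [if_pos (by omega)]
      have h1 : (if ab.1 - start0 < 0 then 0 else ab.1 - start0) = max (ab.1 - start0) 0 := by
        split <;> omega
      have h2 : (if ab.2 - start0 > L then L else ab.2 - start0) = min (ab.2 - start0) L := by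
        split <;> omega
      rw [h1, h2]
      simp [pvEv]
    · rw [if_neg hk]
      by_cases hg : ab.2 - start0 ≤ 0 ∨ ab.1 - start0 ≥ L
      · rw [if_pos hg]
      · rw [if_neg hg, if_neg (by omega)]

lemma clipA_pos : ∀ (ts : List (Int × Int)) (start0 L : Int) (acc : List (Int × Int)),
    (∀ p ∈ acc, p.1 < p.2) → ∀ p ∈ ts.foldl (pvClipStepA start0 L) acc, p.1 < p.2 := by
  intro ts
  induction ts with
  | nil => intro start0 L acc h; simpa using h
  | cons ab ts ih =>
    intro start0 L acc h
    simp only [List.foldl_cons]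
    refine ih start0 L _ ?_
    intro p hp
    unfold pvClipStepA at hp
    dsimp only at hp
    split_ifs at hp <;>
      first
        | exact h p hp
        | (rcases List.mem_append.1 hp with hp | hp
           · exact h p hp
           · rw [List.mem_singleton.1 hp]; dsimp only; omega)

-- ===== VERDICT (by name: the statement is the Claim_ definition above) =====
-- A's merge_intervals is the recursive merge of the sorted list
lemma merge_intervals_eq (rel : List (Int × Int)) :
    merge_intervals rel = mergeRec (PySem.List.sorted2 rel Prod.fst Prod.snd false) := by
  unfold merge_intervals
  by_cases hrel : rel = []
  · rw [if_pos hrel, hrel, show (PySem.List.sorted2 ([] : List (Int × Int)) Prod.fst Prod.snd false)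
      = [] from rfl, mergeRec]
  · rw [if_neg hrel]
    rcases hsort : PySem.List.sorted2 rel Prod.fst Prod.snd false with _ | ⟨first, rest⟩
    · have hperm := PySem.List.sorted2_perm rel Prod.fst Prod.snd false
      rw [hsort] at hperm
      exact absurd hperm.symm.eq_nil hrel
    · have h := foldA_eq_mergeRec rest [] first
      simp only [List.nil_append] at h
      rw [mergeRec]
      exact h

theorem clip_abs_to_rel_spec : Claim_equal_clip_abs_to_rel := by
  intro ts start0 end0 _
  unfold Spec_clip_abs_to_rel clip_abs_to_rel clip_abs_to_rel_alt
  dsimp only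
  rw [merge_intervals_eq]
  rw [show ts.foldl (pvClipStepB start0 (end0 - start0)) []
      = pvEv (ts.foldl (pvClipStepA start0 (end0 - start0)) []) from
    (by simpa [pvEv] using clipB_eq_ev ts start0 (end0 - start0) [])]
  have hpos : ∀ p ∈ ts.foldl (pvClipStepA start0 (end0 - start0)) [], p.1 < p.2 :=
    clipA_pos ts start0 (end0 - start0) [] (by simp)
  set rel := ts.foldl (pvClipStepA start0 (end0 - start0)) [] with hrel
  set S := PySem.List.sorted2 rel Prod.fst Prod.snd false with hS
  have hSperm : S.Perm rel := PySem.List.sorted2_perm rel Prod.fst Prod.snd false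
  have hSpw : S.Pairwise pvLeE := sorted2_pairwise' rel
  have hSpos : ∀ p ∈ S, p.1 < p.2 := fun p hp => hpos p (hSperm.subset hp)
  have hevperm : (pvEv rel).Perm (pvEv S) :=
    List.Perm.flatMap_right _ hSperm.symm
  rw [sorted2_perm_inv _ _ hevperm]
  exact (sweep_main S hSpw hSpos).symm
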